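-- pv_equiv track=rewrite | github.com/aravindas4/snippetbox-1 | leets/count pair diff.py | solve
-- ===== SOURCE A (Python) =====
-- def solve(A, B):
--     N = len(A)
--     mod = (10 ** 9) + 7
--
--     freq = {}
--     for num in A:
--         if num in freq:
--             freq[num] += 1
--         else:
--             freq[num] = 1
--
--     count = 0
--
--     for ind in range(1, N):
--         num = A[ind]
--         k1 = A[ind] - B
--         k2 = A[ind] + B
--
--         if k1 in freq and freq[k1] > 0 and freq[num] > 0:
--             count += ((freq[k1] * freq[num]) % mod)
--
--         if k2 in freq and freq[k2] > 0 and freq[num] > 0: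
--             count += ((freq[k2] * freq[num]) % mod)
--
--     return count
-- ===== SOURCE B (Python) =====
-- def solve(A, B):
--     mod = (10 ** 9) + 7
--
--     freq = {}
--     for x in A:
--         freq[x] = freq.get(x, 0) + 1
--
--     tail = {}
--     for x in A[1:]:
--         tail[x] = tail.get(x, 0) + 1
--
--     total = 0
--     for v, c in tail.items():
--         fv = freq[v]
--         if v - B in freq:
--             total += c * ((freq[v - B] * fv) % mod)
--         if v + B in freq:
--             total += c * ((freq[v + B] * fv) % mod)
--     return total
-- ===== Notes on version B (the rewrite author's own statement) =====
-- stated objective: alternative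
-- what changed: B replaces A's per-index second pass (one addition per element of A[1:]) by a value-grouped pass: it builds a second frequency table over A[1:] and iterates once per DISTINCT value v, adding count(v) * ((freq[v-B]*freq[v]) % mod) and the symmetric term, so the summation loop runs over distinct values instead of indices.
import Mathlib
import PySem

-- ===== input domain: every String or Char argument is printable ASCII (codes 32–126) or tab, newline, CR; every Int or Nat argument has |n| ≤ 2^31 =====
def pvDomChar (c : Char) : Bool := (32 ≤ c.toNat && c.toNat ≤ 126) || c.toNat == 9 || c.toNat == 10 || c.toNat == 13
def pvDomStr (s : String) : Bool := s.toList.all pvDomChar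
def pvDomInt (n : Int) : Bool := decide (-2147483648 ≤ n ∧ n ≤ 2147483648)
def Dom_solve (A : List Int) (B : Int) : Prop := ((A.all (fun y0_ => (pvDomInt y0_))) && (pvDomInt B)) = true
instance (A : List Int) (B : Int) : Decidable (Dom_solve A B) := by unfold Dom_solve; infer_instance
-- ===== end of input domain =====

-- B replaces A's per-index summation pass by a value-grouped pass over a second frequency
-- table built from A[1:] (one addition per distinct value, weighted by its multiplicity);
-- objective: alternative decomposition, same exact return value.

-- ===== PORT A =====
def solve (A : List Int) (B : Int) : Int :=
  let N := PySem.List.len A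
  let md : Int := 10 ^ 9 + 7
  let freq := A.foldl (fun d num =>
    if d.contains num then d.modify num 0 (· + 1) else d.insert num 1) PySem.Dict.empty
  (PySem.List.pyRange 1 N).foldl (fun count ind =>
    let num := PySem.List.pyGetD A ind 0
    let k1 := num - B
    let k2 := num + B
    let count := if freq.contains k1 = true ∧ 0 < freq.getD k1 0 ∧ 0 < freq.getD num 0 then
        count + PySem.Int.mod (freq.getD k1 0 * freq.getD num 0) md
      else count
    if freq.contains k2 = true ∧ 0 < freq.getD k2 0 ∧ 0 < freq.getD num 0 then
      count + PySem.Int.mod (freq.getD k2 0 * freq.getD num 0) md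
    else count) 0

-- ===== PORT B =====
def solve_alt (A : List Int) (B : Int) : Int :=
  let md : Int := 10 ^ 9 + 7
  let freq := A.foldl (fun d x => d.insert x (d.getD x 0 + 1)) PySem.Dict.empty
  let tail := (PySem.List.slice A (some 1) none).foldl
    (fun d x => d.insert x (d.getD x 0 + 1)) PySem.Dict.empty
  tail.items.foldl (fun total p =>
    let fv := freq.getD p.1 0
    let total := if freq.contains (p.1 - B) = true then
        total + p.2 * PySem.Int.mod (freq.getD (p.1 - B) 0 * fv) md
      else total
    if freq.contains (p.1 + B) = true then
      total + p.2 * PySem.Int.mod (freq.getD (p.1 + B) 0 * fv) md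
    else total) 0

-- ===== PRECONDITION & SPEC =====
def Spec_solve (A : List Int) (B : Int) (out : Int) : Prop := out = solve_alt A B
instance (A : List Int) (B : Int) (out : Int) : Decidable (Spec_solve A B out) := by unfold Spec_solve; infer_instance

-- ===== CLAIM (what is proved, stated in full; the proofs are below) =====
def Claim_equal_solve : Prop := ∀ (A : List Int) (B : Int), Dom_solve A B → Spec_solve A B (solve A B)

-- ===== LEMMAS AND PROOFS =====

-- value of one index/value of A's summation loop, with the (always-true) positivity guards kept
def pvFA (A : List Int) (B : Int) (v : Int) : Int :=
  (if A.contains (v - B) = true ∧ 0 < (List.count (v - B) A : Int) ∧ 0 < (List.count v A : Int) then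
     PySem.Int.mod ((List.count (v - B) A : Int) * (List.count v A : Int)) (10 ^ 9 + 7) else 0)
  + (if A.contains (v + B) = true ∧ 0 < (List.count (v + B) A : Int) ∧ 0 < (List.count v A : Int) then
     PySem.Int.mod ((List.count (v + B) A : Int) * (List.count v A : Int)) (10 ^ 9 + 7) else 0)

def pvGA (A : List Int) (B : Int) (ind : Int) : Int := pvFA A B (PySem.List.pyGetD A ind 0)

-- the guard-free per-value term both sides reduce to
def pvF0 (A : List Int) (B : Int) (v : Int) : Int :=
  (if A.contains (v - B) = true then
     PySem.Int.mod ((List.count (v - B) A : Int) * (List.count v A : Int)) (10 ^ 9 + 7) else 0)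
  + (if A.contains (v + B) = true then
     PySem.Int.mod ((List.count (v + B) A : Int) * (List.count v A : Int)) (10 ^ 9 + 7) else 0)

-- value of one distinct value of B's grouped loop
def pvGB (A : List Int) (B : Int) (k : Int) : Int :=
  (if A.contains (k - B) = true then
     (List.count k A.tail : Int) * PySem.Int.mod ((List.count (k - B) A : Int) * (List.count k A : Int)) (10 ^ 9 + 7) else 0)
  + (if A.contains (k + B) = true then
     (List.count k A.tail : Int) * PySem.Int.mod ((List.count (k + B) A : Int) * (List.count k A : Int)) (10 ^ 9 + 7) else 0)

lemma step_modify (d : PySem.Dict Int Int) (x : Int) :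
    (if d.contains x then d.modify x 0 (· + 1) else d.insert x 1) = d.modify x 0 (· + 1) := by
  by_cases h : d.contains x = true
  · simp [h]
  · have hb : d.contains x = false := by simpa using h
    rw [if_neg (by simp [hb])]
    simp [PySem.Dict.modify, PySem.Dict.getD_of_not_contains _ _ hb]

lemma freqA_eq (A : List Int) :
    A.foldl (fun d num =>
      if d.contains num then d.modify num 0 (· + 1) else d.insert num 1) PySem.Dict.empty
      = PySem.Dict.counter A := by
  rw [PySem.Dict.counter_eq_foldl]
  exact PySem.List.foldl_congr_mem _ _ _ _ (fun acc x _ => step_modify acc x)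

lemma map_tail (xs : List Int) :
    (PySem.List.pyRange 1 (PySem.List.len xs)).map (fun j => PySem.List.pyGetD xs j 0) = xs.tail := by
  cases xs with
  | nil => rfl
  | cons a t =>
    have hl : (0 : Int) < PySem.List.len (a :: t) := by simp [PySem.List.len]
    have h := PySem.List.map_pyGetD_pyRange_zero (a :: t) 0
    rw [PySem.List.pyRange_one_cons hl, List.map_cons] at h
    norm_num at h
    simpa [PySem.List.len] using h

lemma groupsum (l : List Int) (f : Int → Int) :
    (l.map f).sum = ((PySem.Set.ofList l).map (fun v => (List.count v l : Int) * f v)).sum := by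
  rw [Finset.sum_list_map_count l f,
    Finset.sum_list_map_count (PySem.Set.ofList l) (fun v => (List.count v l : Int) * f v)]
  have hts : (PySem.Set.ofList l).toFinset = l.toFinset := by
    ext x; simp [PySem.Set.mem_ofList]
  rw [hts]
  apply Finset.sum_congr rfl
  intro m hm
  have hnd := PySem.Set.nodup_ofList l
  have hmem : m ∈ PySem.Set.ofList l := by
    rw [PySem.Set.mem_ofList]; exact List.mem_toFinset.mp hm
  have hone : List.count m (PySem.Set.ofList l) = 1 := by
    have hpos : 0 < List.count m (PySem.Set.ofList l) := List.count_pos_iff.mpr hmem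
    have hle : List.count m (PySem.Set.ofList l) ≤ 1 := List.nodup_iff_count_le_one.mp hnd m
    omega
  rw [hone]
  simp

lemma solve_eq_alt (A : List Int) (B : Int) : solve A B = solve_alt A B := by
  unfold solve solve_alt
  simp only [freqA_eq, PySem.Dict.foldl_insert_getD_add_one_eq_counter, PySem.List.slice_from_one,
    PySem.Dict.items_counter, PySem.Dict.contains_counter, PySem.Dict.getD_counter, List.foldl_map]
  have h1 : ∀ (acc : Int), ∀ x ∈ PySem.List.pyRange 1 (PySem.List.len A),
      (if A.contains (PySem.List.pyGetD A x 0 + B) = true ∧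
          0 < (List.count (PySem.List.pyGetD A x 0 + B) A : Int) ∧
          0 < (List.count (PySem.List.pyGetD A x 0) A : Int) then
        (if A.contains (PySem.List.pyGetD A x 0 - B) = true ∧
            0 < (List.count (PySem.List.pyGetD A x 0 - B) A : Int) ∧
            0 < (List.count (PySem.List.pyGetD A x 0) A : Int) then
          acc + PySem.Int.mod ((List.count (PySem.List.pyGetD A x 0 - B) A : Int) *
            (List.count (PySem.List.pyGetD A x 0) A : Int)) (10 ^ 9 + 7)
         else acc)
          + PySem.Int.mod ((List.count (PySem.List.pyGetD A x 0 + B) A : Int) *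
            (List.count (PySem.List.pyGetD A x 0) A : Int)) (10 ^ 9 + 7)
       else
        (if A.contains (PySem.List.pyGetD A x 0 - B) = true ∧
            0 < (List.count (PySem.List.pyGetD A x 0 - B) A : Int) ∧
            0 < (List.count (PySem.List.pyGetD A x 0) A : Int) then
          acc + PySem.Int.mod ((List.count (PySem.List.pyGetD A x 0 - B) A : Int) *
            (List.count (PySem.List.pyGetD A x 0) A : Int)) (10 ^ 9 + 7)
         else acc))
      = acc + pvGA A B x := by
    intro acc x _
    simp only [pvGA, pvFA]
    split_ifs <;> ring
  rw [PySem.List.foldl_congr_mem _ _ _ _ h1, PySem.List.foldl_add]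
  have h2 : ∀ (acc : Int), ∀ k ∈ PySem.Set.ofList A.tail,
      (if A.contains (k + B) = true then
        (if A.contains (k - B) = true then
          acc + (List.count k A.tail : Int) *
            PySem.Int.mod ((List.count (k - B) A : Int) * (List.count k A : Int)) (10 ^ 9 + 7)
         else acc)
          + (List.count k A.tail : Int) *
            PySem.Int.mod ((List.count (k + B) A : Int) * (List.count k A : Int)) (10 ^ 9 + 7)
       else
        (if A.contains (k - B) = true then
          acc + (List.count k A.tail : Int) *
            PySem.Int.mod ((List.count (k - B) A : Int) * (List.count k A : Int)) (10 ^ 9 + 7)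
         else acc))
      = acc + pvGB A B k := by
    intro acc k _
    simp only [pvGB]
    split_ifs <;> ring
  rw [PySem.List.foldl_congr_mem _ _ _ _ h2, PySem.List.foldl_add]
  simp only [zero_add]
  have hga : List.map (pvGA A B) (PySem.List.pyRange 1 (PySem.List.len A))
      = List.map (pvFA A B) A.tail := by
    have h3 : List.map (pvGA A B) (PySem.List.pyRange 1 (PySem.List.len A))
        = List.map (pvFA A B) ((PySem.List.pyRange 1 (PySem.List.len A)).map
            (fun j => PySem.List.pyGetD A j 0)) := by
      rw [List.map_map]; rfl
    rw [h3, map_tail]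
  rw [hga]
  have hfa : List.map (pvFA A B) A.tail = List.map (pvF0 A B) A.tail := by
    apply List.map_congr_left
    intro v hv
    have hv' : v ∈ A := List.mem_of_mem_tail hv
    simp only [pvFA, pvF0]
    congr 1
    · simp [hv']
    · simp [hv']
  rw [hfa, groupsum A.tail (pvF0 A B)]
  apply congrArg
  apply List.map_congr_left
  intro k _
  simp only [pvGB, pvF0]
  split_ifs <;> ring

-- ===== VERDICT (by name: the statement is the Claim_ definition above) =====
theorem solve_spec : Claim_equal_solve := by
  intro A B _
  unfold Spec_solve
  exact solve_eq_alt A B
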